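-- pv_equiv track=rewrite | github.com/papibe/advent-of-code-2024 | python/day21/part2.py | get_num_pad
-- ===== SOURCE A (Python) =====
-- from itertools import product
--
-- def get_num_pad(code, numpad):
--
--     sols = []
--     prev = "A"
--     for char in code:
--         local_sol = []
--         for path in numpad[prev][char]:
--             local_sol.append(path + "A")
--         sols.append(local_sol)
--         prev = char
--     fsols = product(*sols)
--     otuput = []
--     for sol in fsols:
--         otuput.append("".join(sol))
--     return otuput
-- ===== SOURCE B (Python) =====
-- def get_num_pad(code, numpad):
--     result = [""]
--     prev = "A"
--     for char in code:
--         result = [prefix + path + "A" for prefix in result for path in numpad[prev][char]]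
--         prev = char
--     return result
-- ===== Notes on version B (the rewrite author's own statement) =====
-- stated objective: simpler
-- what changed: Replaces A's two-phase design (build per-char option lists, itertools.product, then join each tuple) with a single pass that keeps a running list of partial result strings, extending every prefix by each path for the current char.
import Mathlib
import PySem

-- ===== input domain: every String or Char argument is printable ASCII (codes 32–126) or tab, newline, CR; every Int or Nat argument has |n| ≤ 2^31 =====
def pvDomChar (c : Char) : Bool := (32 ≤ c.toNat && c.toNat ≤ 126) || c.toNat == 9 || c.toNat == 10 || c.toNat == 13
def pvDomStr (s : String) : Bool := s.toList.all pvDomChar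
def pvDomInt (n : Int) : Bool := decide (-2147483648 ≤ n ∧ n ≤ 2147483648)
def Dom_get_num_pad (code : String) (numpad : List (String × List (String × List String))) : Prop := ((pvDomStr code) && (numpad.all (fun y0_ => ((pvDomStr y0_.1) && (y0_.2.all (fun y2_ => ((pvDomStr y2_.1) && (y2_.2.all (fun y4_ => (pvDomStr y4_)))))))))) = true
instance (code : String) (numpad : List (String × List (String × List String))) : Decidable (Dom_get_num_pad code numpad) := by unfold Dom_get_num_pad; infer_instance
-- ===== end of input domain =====

-- B interleaves the cross-product with the string building: one running list of partial
-- result strings instead of A's per-char option lists + itertools.product + join (objective: simpler).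

-- numpad[p][c] with the two first-match lookups; the getD [] defaults are unreachable inside Pre_
def pvPaths (numpad : List (String × List (String × List String))) (p c : String) : List String :=
  (List.lookup c ((List.lookup p numpad).getD [])).getD []

-- ===== PORT A =====
-- itertools.product(*sols): first list varies slowest, last fastest
def pvProduct : List (List String) → List (List String)
  | [] => [[]]
  | xs :: rest => xs.flatMap (fun x => (pvProduct rest).map (fun t => x :: t))

def get_num_pad (code : String) (numpad : List (String × List (String × List String))) : List String :=
  let st := code.toList.foldl
    (fun (st : List (List String) × String) c =>
      let ch := String.ofList [c]
      let local_sol := (pvPaths numpad st.2 ch).map (fun path => path ++ "A")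
      (st.1 ++ [local_sol], ch)) ([], "A")
  (pvProduct st.1).map (fun sol => PySem.Str.join "" sol)

-- ===== PORT B =====
def get_num_pad_alt (code : String) (numpad : List (String × List (String × List String))) : List String :=
  (code.toList.foldl
    (fun (st : List String × String) c =>
      let ch := String.ofList [c]
      (st.1.flatMap (fun pre => (pvPaths numpad st.2 ch).map (fun path => pre ++ path ++ "A")), ch))
    ([""], "A")).1

-- ===== PRECONDITION & SPEC =====
-- Pre_ excludes exactly the inputs on which Python A raises KeyError: some consecutive
-- (prev, char) pair of the code (starting from prev = "A") is not a chain of keys of numpad.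
def Pre_get_num_pad (code : String) (numpad : List (String × List (String × List String))) : Prop :=
  ((("A" :: code.toList.map (fun c => String.ofList [c])).zip (code.toList.map (fun c => String.ofList [c]))).all
    (fun pc => match List.lookup pc.1 numpad with
               | some inner => (List.lookup pc.2 inner).isSome
               | none => false)) = true
instance (code : String) (numpad : List (String × List (String × List String))) : Decidable (Pre_get_num_pad code numpad) := by unfold Pre_get_num_pad; infer_instance

def pvWitness_get_num_pad : String × (List (String × List (String × List String))) :=
  ("02", [("A", [("0", ["<"])]), ("0", [("2", ["^"])]), ("2", [("9", ["^^>", ">^^"])])])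

def Spec_get_num_pad (code : String) (numpad : List (String × List (String × List String))) (out : List String) : Prop := out = get_num_pad_alt code numpad
instance (code : String) (numpad : List (String × List (String × List String))) (out : List String) : Decidable (Spec_get_num_pad code numpad out) := by unfold Spec_get_num_pad; infer_instance

-- ===== CLAIM (what is proved, stated in full; the proofs are below) =====
def Claim_equal_get_num_pad : Prop := ∀ (code : String) (numpad : List (String × List (String × List String))), Dom_get_num_pad code numpad → Pre_get_num_pad code numpad → Spec_get_num_pad code numpad (get_num_pad code numpad)

-- ===== LEMMAS AND PROOFS =====

theorem pvStrJoin_nil : PySem.Str.join "" [] = "" := by decide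

theorem pvStrJoin_cons (x : String) (l : List String) :
    PySem.Str.join "" (x :: l) = x ++ PySem.Str.join "" l := by
  cases l <;> simp [PySem.Str.join, PySem.Chars.join, List.intercalate]

-- the per-char option lists A accumulates, as a structural recursion
def pvSols (numpad : List (String × List (String × List String))) :
    List Char → String → List (List String)
  | [], _ => []
  | c :: cs, p =>
      ((pvPaths numpad p (String.ofList [c])).map (fun path => path ++ "A")) :: pvSols numpad cs (String.ofList [c])

theorem pvFoldA (numpad : List (String × List (String × List String)))
    (cs : List Char) (p : String) (acc : List (List String)) :
    (cs.foldl
      (fun (st : List (List String) × String) c =>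
        let ch := String.ofList [c]
        let local_sol := (pvPaths numpad st.2 ch).map (fun path => path ++ "A")
        (st.1 ++ [local_sol], ch)) (acc, p)).1 = acc ++ pvSols numpad cs p := by
  induction cs generalizing p acc with
  | nil => simp [pvSols]
  | cons c cs ih => simp [pvSols, ih, List.append_assoc]

theorem pvFoldB (numpad : List (String × List (String × List String)))
    (cs : List Char) (p : String) (acc : List String) :
    (cs.foldl
      (fun (st : List String × String) c =>
        let ch := String.ofList [c]
        (st.1.flatMap (fun pre => (pvPaths numpad st.2 ch).map (fun path => pre ++ path ++ "A")), ch))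
      (acc, p)).1
    = acc.flatMap (fun pre => (pvProduct (pvSols numpad cs p)).map
        (fun sol => pre ++ PySem.Str.join "" sol)) := by
  induction cs generalizing p acc with
  | nil => simp [pvSols, pvProduct, pvStrJoin_nil]
  | cons c cs ih =>
      simp only [List.foldl_cons, ih, pvSols, pvProduct]
      simp [List.flatMap_map, List.map_flatMap, List.flatMap_assoc, pvStrJoin_cons,
            String.append_assoc, Function.comp_def]

theorem get_num_pad_eq_alt (code : String) (numpad : List (String × List (String × List String))) :
    get_num_pad code numpad = get_num_pad_alt code numpad := by
  simp only [get_num_pad, get_num_pad_alt, pvFoldA, pvFoldB]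
  simp

-- ===== VERDICT (by name: the statement is the Claim_ definition above) =====
theorem get_num_pad_spec : Claim_equal_get_num_pad := by
  intro code numpad _ _
  unfold Spec_get_num_pad
  exact get_num_pad_eq_alt code numpad
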